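-- pv_equiv track=rewrite | github.com/Shoma-DS/team-info | .agent/skills/common/gws-sheets-duplicate-checker/scripts/check_sheet_duplicates.py | build_duplicate_groups
-- ===== SOURCE A (Python) =====
-- from collections import defaultdict
--
-- def normalize_value(value: str) -> str:
--     return str(value or "").strip()
--
-- def build_duplicate_groups(rows: list[dict], key_columns: list[str], exclude_all_blank: bool = True) -> tuple[dict[tuple[str, ...], list[dict]], int]:
--     groups: dict[tuple[str, ...], list[dict]] = defaultdict(list)
--     skipped = 0
--     for row in rows:
--         key = tuple(normalize_value(row.get(column, "")) for column in key_columns)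
--         if exclude_all_blank and all(part == "" for part in key):
--             skipped += 1
--             continue
--         groups[key].append(row)
--     duplicate_groups = {key: group for key, group in groups.items() if len(group) >= 2}
--     return duplicate_groups, skipped
-- ===== SOURCE B (Python) =====
-- def build_duplicate_groups(rows, key_columns, exclude_all_blank=True):
--     # Two-pass: first pass records each row's key (None when skipped) and counts
--     # key occurrences; second pass emits, in row order, only rows whose key is
--     # shared by at least two rows. No group lists are built for unique keys.
--     keys = []
--     counts = {}
--     skipped = 0
--     for row in rows:
--         key = tuple(str(row.get(column, "") or "").strip() for column in key_columns)
--         if exclude_all_blank and all(part == "" for part in key):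
--             skipped += 1
--             keys.append(None)
--         else:
--             keys.append(key)
--             counts[key] = counts.get(key, 0) + 1
--     result = {}
--     for row, key in zip(rows, keys):
--         if key is not None and counts[key] >= 2:
--             result.setdefault(key, []).append(row)
--     return result, skipped
-- ===== Notes on version B (the rewrite author's own statement) =====
-- stated objective: alternative
-- what changed: Replaces A's group-everything-into-a-defaultdict-then-filter with a two-pass count-then-emit: pass 1 records each row's key (None when skipped) and a per-key occurrence count, pass 2 re-walks the rows and emits only rows whose key occurs at least twice, so no group list is ever built for a unique key.
import Mathlib
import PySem

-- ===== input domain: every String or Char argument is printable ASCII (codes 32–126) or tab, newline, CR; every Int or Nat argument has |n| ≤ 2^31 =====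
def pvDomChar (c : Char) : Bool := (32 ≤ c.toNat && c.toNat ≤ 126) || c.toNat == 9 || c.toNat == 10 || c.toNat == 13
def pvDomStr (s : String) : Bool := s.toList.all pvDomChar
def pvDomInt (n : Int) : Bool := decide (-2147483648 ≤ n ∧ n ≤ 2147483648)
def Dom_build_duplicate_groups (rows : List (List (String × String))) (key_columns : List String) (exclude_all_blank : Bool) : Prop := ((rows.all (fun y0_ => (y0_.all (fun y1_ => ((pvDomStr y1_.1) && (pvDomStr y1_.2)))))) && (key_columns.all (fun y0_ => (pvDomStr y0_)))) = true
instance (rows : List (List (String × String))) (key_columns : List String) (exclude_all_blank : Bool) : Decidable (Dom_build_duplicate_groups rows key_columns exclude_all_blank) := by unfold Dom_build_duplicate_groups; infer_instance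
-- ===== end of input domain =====

-- B replaces A's group-everything-then-filter with a two-pass count-then-emit that never
-- builds group lists for unique keys (objective: alternative decomposition, same order of output).

-- ===== PORT A =====
-- normalize_value(value) = str(value or "").strip(): '' stays '', otherwise strip
def normalize_value (value : String) : String :=
  PySem.Str.strip (if value == "" then "" else value)

-- key = tuple(normalize_value(row.get(column, "")) for column in key_columns)  (shared helper line of both Pythons)
def bdg_key (row : List (String × String)) (key_columns : List String) : List String :=
  key_columns.map (fun column => normalize_value ((PySem.Dict.mk row).getD column ""))

def build_duplicate_groups (rows : List (List (String × String))) (key_columns : List String) (exclude_all_blank : Bool) : (List (List String × List (List (String × String)))) × Int :=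
  -- groups = defaultdict(list); skipped = 0; one pass appending each kept row to groups[key]
  let st := rows.foldl
    (fun (st : PySem.Dict (List String) (List (List (String × String))) × Int) row =>
      let key := bdg_key row key_columns
      if exclude_all_blank && key.all (fun part => part == "") then
        (st.1, st.2 + 1)
      else
        (st.1.modify key [] (fun g => g ++ [row]), st.2))
    (PySem.Dict.empty, 0)
  -- duplicate_groups = {key: group for key, group in groups.items() if len(group) >= 2}
  ((st.1.items.filter (fun p => decide (p.2.length ≥ 2))), st.2)

-- ===== PORT B =====
def build_duplicate_groups_alt (rows : List (List (String × String))) (key_columns : List String) (exclude_all_blank : Bool) : (List (List String × List (List (String × String)))) × Int :=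
  -- pass 1: keys (None when skipped), counts dict, skipped counter
  let st := rows.foldl
    (fun (st : List (Option (List String)) × PySem.Dict (List String) Int × Int) row =>
      let key := bdg_key row key_columns
      if exclude_all_blank && key.all (fun part => part == "") then
        (st.1 ++ [none], st.2.1, st.2.2 + 1)
      else
        (st.1 ++ [some key], st.2.1.insert key (st.2.1.getD key 0 + 1), st.2.2))
    ([], PySem.Dict.empty, 0)
  -- pass 2: for row, key in zip(rows, keys): emit rows whose key occurs >= 2 times
  -- (result.setdefault(key, []).append(row) is Dict.modify key [] (· ++ [row]))
  let result := (rows.zip st.1).foldl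
    (fun (d : PySem.Dict (List String) (List (List (String × String)))) p =>
      match p.2 with
      | none => d
      | some key => if st.2.1.getD key 0 ≥ 2 then d.modify key [] (fun g => g ++ [p.1]) else d)
    PySem.Dict.empty
  (result.items, st.2.2)

-- ===== PRECONDITION & SPEC =====
def Spec_build_duplicate_groups (rows : List (List (String × String))) (key_columns : List String) (exclude_all_blank : Bool) (out : (List (List String × List (List (String × String)))) × Int) : Prop := out = build_duplicate_groups_alt rows key_columns exclude_all_blank
instance (rows : List (List (String × String))) (key_columns : List String) (exclude_all_blank : Bool) (out : (List (List String × List (List (String × String)))) × Int) : Decidable (Spec_build_duplicate_groups rows key_columns exclude_all_blank out) := by unfold Spec_build_duplicate_groups; infer_instance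

-- ===== CLAIM (what is proved, stated in full; the proofs are below) =====
def Claim_equal_build_duplicate_groups : Prop := ∀ (rows : List (List (String × String))) (key_columns : List String) (exclude_all_blank : Bool), Dom_build_duplicate_groups rows key_columns exclude_all_blank → Spec_build_duplicate_groups rows key_columns exclude_all_blank (build_duplicate_groups rows key_columns exclude_all_blank)

-- ===== LEMMAS AND PROOFS =====

-- abbreviations used only by the proofs
def bdgSkip (key_columns : List String) (exclude_all_blank : Bool) (row : List (String × String)) : Bool :=
  exclude_all_blank && (bdg_key row key_columns).all (fun part => part == "")

def bdgPairs (rows : List (List (String × String))) (key_columns : List String) (exclude_all_blank : Bool) : List (List String × List (String × String)) :=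
  rows.filterMap (fun row => if bdgSkip key_columns exclude_all_blank row then none else some (bdg_key row key_columns, row))

def bdgG (l : List (List String × List (String × String))) (d : PySem.Dict (List String) (List (List (String × String)))) : PySem.Dict (List String) (List (List (String × String))) :=
  l.foldl (fun d p => d.modify p.1 [] (fun g => g ++ [p.2])) d

-- A's fold, restructured
theorem bdg_foldA (key_columns : List String) (exclude_all_blank : Bool) :
    ∀ (rows : List (List (String × String))) (d : PySem.Dict (List String) (List (List (String × String)))) (s : Int),
    rows.foldl
      (fun (st : PySem.Dict (List String) (List (List (String × String))) × Int) row =>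
        let key := bdg_key row key_columns
        if exclude_all_blank && key.all (fun part => part == "") then
          (st.1, st.2 + 1)
        else
          (st.1.modify key [] (fun g => g ++ [row]), st.2))
      (d, s)
    = (bdgG (bdgPairs rows key_columns exclude_all_blank) d,
       s + (rows.countP (bdgSkip key_columns exclude_all_blank) : Int)) := by
  intro rows
  induction rows with
  | nil => intro d s; simp [bdgPairs, bdgG]
  | cons r rs ih =>
    intro d s
    by_cases h : bdgSkip key_columns exclude_all_blank r
    · simp only [List.foldl_cons, List.countP_cons, bdgPairs, List.filterMap_cons, h,
        if_pos (show (exclude_all_blank && (bdg_key r key_columns).all (fun part => part == "")) = true from h)]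
      rw [ih]
      simp [bdgPairs]
      ring
    · simp only [List.foldl_cons, List.countP_cons, bdgPairs, List.filterMap_cons, h,
        if_neg (show ¬ (exclude_all_blank && (bdg_key r key_columns).all (fun part => part == "")) = true from h)]
      rw [ih]
      simp [bdgPairs, bdgG]

-- B's first fold, restructured
theorem bdg_foldB1 (key_columns : List String) (exclude_all_blank : Bool) :
    ∀ (rows : List (List (String × String))) (ks : List (Option (List String))) (c : PySem.Dict (List String) Int) (s : Int),
    rows.foldl
      (fun (st : List (Option (List String)) × PySem.Dict (List String) Int × Int) row =>
        let key := bdg_key row key_columns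
        if exclude_all_blank && key.all (fun part => part == "") then
          (st.1 ++ [none], st.2.1, st.2.2 + 1)
        else
          (st.1 ++ [some key], st.2.1.insert key (st.2.1.getD key 0 + 1), st.2.2))
      (ks, c, s)
    = (ks ++ rows.map (fun row => if bdgSkip key_columns exclude_all_blank row then none else some (bdg_key row key_columns)),
       ((bdgPairs rows key_columns exclude_all_blank).map Prod.fst).foldl (fun d x => d.insert x (d.getD x 0 + 1)) c,
       s + (rows.countP (bdgSkip key_columns exclude_all_blank) : Int)) := by
  intro rows
  induction rows with
  | nil => intro ks c s; simp [bdgPairs]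
  | cons r rs ih =>
    intro ks c s
    by_cases h : bdgSkip key_columns exclude_all_blank r
    · simp only [List.foldl_cons, List.countP_cons, bdgPairs, List.filterMap_cons, List.map_cons, h,
        if_pos (show (exclude_all_blank && (bdg_key r key_columns).all (fun part => part == "")) = true from h)]
      rw [ih]
      simp [bdgPairs]
      ring
    · simp only [List.foldl_cons, List.countP_cons, bdgPairs, List.filterMap_cons, List.map_cons, h,
        if_neg (show ¬ (exclude_all_blank && (bdg_key r key_columns).all (fun part => part == "")) = true from h)]
      rw [ih]
      simp [bdgPairs]

theorem bdg_zip_self_map {α β : Type} (g : α → Option β) : ∀ (l : List α), l.zip (l.map g) = l.map (fun a => (a, g a)) := by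
  intro l; induction l with
  | nil => rfl
  | cons x xs ih => simp [ih]

-- B's second fold = bdgG over the pairs whose key passes the count test
theorem bdg_foldB2 (key_columns : List String) (exclude_all_blank : Bool) (cnt : PySem.Dict (List String) Int) :
    ∀ (rows : List (List (String × String))) (d : PySem.Dict (List String) (List (List (String × String)))),
    (rows.map (fun row => (row, if bdgSkip key_columns exclude_all_blank row then none else some (bdg_key row key_columns)))).foldl
      (fun (d : PySem.Dict (List String) (List (List (String × String)))) p =>
        match p.2 with
        | none => d
        | some key => if cnt.getD key 0 ≥ 2 then d.modify key [] (fun g => g ++ [p.1]) else d)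
      d
    = bdgG ((bdgPairs rows key_columns exclude_all_blank).filter (fun p => decide (cnt.getD p.1 0 ≥ 2))) d := by
  intro rows
  induction rows with
  | nil => intro d; simp [bdgPairs, bdgG]
  | cons r rs ih =>
    intro d
    by_cases h : bdgSkip key_columns exclude_all_blank r
    · simp only [List.map_cons, List.foldl_cons, bdgPairs, List.filterMap_cons, if_pos h]
      rw [ih]
      simp [bdgPairs]
    · simp only [List.map_cons, List.foldl_cons, bdgPairs, List.filterMap_cons, if_neg h]
      rw [ih]
      by_cases h2 : cnt.getD (bdg_key r key_columns) 0 ≥ 2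
      · simp [bdgPairs, bdgG, h2]
      · simp [bdgPairs, bdgG, h2]

-- get? ignores entries whose key fails a key-predicate the queried key satisfies
theorem bdg_get?_mk_filter (c : List String → Bool) (k : List String) (hc : c k = true) :
    ∀ (l : List (List String × List (List (String × String)))),
    (PySem.Dict.mk (l.filter (fun p => c p.1))).get? k = (PySem.Dict.mk l).get? k := by
  intro l
  induction l with
  | nil => rfl
  | cons p rest ih =>
    obtain ⟨k', v⟩ := p
    by_cases hp : c k'
    · simp only [List.filter_cons, hp, if_true]
      rw [PySem.Dict.get?_mk_cons, PySem.Dict.get?_mk_cons, ih]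
    · have hne : (k' == k) = false := by
        refine beq_eq_false_iff_ne.mpr ?_
        intro hkk; rw [hkk] at hp; exact hp hc
      simp only [List.filter_cons, hp, if_false, Bool.false_eq_true]
      rw [PySem.Dict.get?_mk_cons, hne, ih]
      simp

-- inserting a key the predicate keeps commutes with filtering the items by the key predicate
theorem bdg_insert_filter_pos (c : List String → Bool) (k : List String) (hc : c k = true)
    (w : List (List (String × String))) (d : PySem.Dict (List String) (List (List (String × String)))) :
    ((PySem.Dict.mk (d.items.filter (fun p => c p.1))).insert k w).items
      = ((d.insert k w).items).filter (fun p => c p.1) := by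
  have hmap : ∀ p : List String × List (List (String × String)),
      c (if p.1 == k then (k, w) else p).1 = c p.1 := by
    intro p
    by_cases hpk : p.1 == k
    · have : p.1 = k := eq_of_beq hpk
      simp [this]
    · simp [hpk]
  have hcont : (PySem.Dict.mk (d.items.filter (fun p => c p.1))).contains k = d.contains k := by
    rw [PySem.Dict.contains_eq_isSome_get?, PySem.Dict.contains_eq_isSome_get?,
      bdg_get?_mk_filter c k hc d.items]
  by_cases h : d.contains k = true
  · rw [PySem.Dict.items_insert_of_contains _ w (hcont.trans h),
      PySem.Dict.items_insert_of_contains d w h]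
    show (d.items.filter (fun p => c p.1)).map _ = _
    rw [List.filter_map]
    congr 1
    apply List.filter_congr
    intro p _
    exact (hmap p).symm
  · have h' : d.contains k = false := by simpa using h
    rw [PySem.Dict.items_insert_of_not_contains _ w (hcont.trans h'),
      PySem.Dict.items_insert_of_not_contains d w h']
    show d.items.filter (fun p => c p.1) ++ [(k, w)] = _
    rw [List.filter_append]
    simp [hc]

-- inserting a key the predicate drops leaves the filtered items unchanged
theorem bdg_insert_filter_neg (c : List String → Bool) (k : List String) (hc : c k = false)
    (w : List (List (String × String))) (d : PySem.Dict (List String) (List (List (String × String)))) :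
    d.items.filter (fun p => c p.1) = ((d.insert k w).items).filter (fun p => c p.1) := by
  have hmap : ∀ p : List String × List (List (String × String)),
      c (if p.1 == k then (k, w) else p).1 = c p.1 := by
    intro p
    by_cases hpk : p.1 == k
    · have : p.1 = k := eq_of_beq hpk
      simp [this]
    · simp [hpk]
  by_cases h : d.contains k = true
  · rw [PySem.Dict.items_insert_of_contains d w h, List.filter_map]
    have : d.items.filter ((fun p => c p.1) ∘ fun p => if p.1 == k then (k, w) else p)
        = d.items.filter (fun p => c p.1) := by
      apply List.filter_congr
      intro p _
      exact hmap p
    rw [this]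
    have hid : ∀ p ∈ d.items.filter (fun p => c p.1),
        (if p.1 == k then (k, w) else p) = p := by
      intro p hp
      have hcp : c p.1 = true := by
        have := List.of_mem_filter hp
        simpa using this
      have hpk : (p.1 == k) = false := by
        refine beq_eq_false_iff_ne.mpr ?_
        intro hkk
        rw [hkk] at hcp
        rw [hcp] at hc
        simp at hc
      simp [hpk]
    rw [List.map_congr_left hid]
    simp
  · have h' : d.contains k = false := by simpa using h
    rw [PySem.Dict.items_insert_of_not_contains d w h', List.filter_append]
    simp [hc]

-- main invariant: filtering the pair stream by a key predicate = filtering the final items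
theorem bdg_G_filter (c : List String → Bool) :
    ∀ (l : List (List String × List (String × String))) (d : PySem.Dict (List String) (List (List (String × String)))),
    (bdgG (l.filter (fun p => c p.1)) (PySem.Dict.mk (d.items.filter (fun p => c p.1)))).items
      = (bdgG l d).items.filter (fun p => c p.1) := by
  intro l
  induction l with
  | nil => intro d; simp [bdgG]
  | cons p rest ih =>
    intro d
    obtain ⟨k, v⟩ := p
    have hstep : ∀ (t : List (List String × List (String × String)))
        (e : PySem.Dict (List String) (List (List (String × String)))),
        bdgG ((k, v) :: t) e = bdgG t (e.modify k [] (fun g => g ++ [v])) := fun _ _ => rfl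
    have hmod : ∀ (e : PySem.Dict (List String) (List (List (String × String)))),
        e.modify k [] (fun g => g ++ [v]) = e.insert k (e.getD k [] ++ [v]) := fun _ => rfl
    by_cases hk : c k = true
    · have hgetD : (PySem.Dict.mk (d.items.filter (fun p => c p.1))).getD k [] = d.getD k [] := by
        rw [PySem.Dict.getD_eq_get?_getD, PySem.Dict.getD_eq_get?_getD,
          bdg_get?_mk_filter c k hk d.items]
      rw [show ((k, v) :: rest).filter (fun p => c p.1) = (k, v) :: rest.filter (fun p => c p.1) by
        simp [hk]]
      rw [hstep, hstep, hmod, hmod, hgetD]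
      have hdict : (PySem.Dict.mk (d.items.filter (fun p => c p.1))).insert k (d.getD k [] ++ [v])
          = PySem.Dict.mk (((d.insert k (d.getD k [] ++ [v])).items).filter (fun p => c p.1)) := by
        apply PySem.Dict.ext
        exact bdg_insert_filter_pos c k hk _ d
      rw [hdict]
      exact ih (d.insert k (d.getD k [] ++ [v]))
    · have hk' : c k = false := by simpa using hk
      rw [show ((k, v) :: rest).filter (fun p => c p.1) = rest.filter (fun p => c p.1) by
        simp [hk']]
      rw [hstep, hmod]
      have hdict : PySem.Dict.mk (d.items.filter (fun p => c p.1))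
          = PySem.Dict.mk (((d.insert k (d.getD k [] ++ [v])).items).filter (fun p => c p.1)) := by
        apply PySem.Dict.ext
        exact bdg_insert_filter_neg c k hk' _ d
      rw [hdict]
      exact ih (d.insert k (d.getD k [] ++ [v]))

-- ===== VERDICT (by name: the statement is the Claim_ definition above) =====
set_option maxHeartbeats 1000000 in
theorem build_duplicate_groups_spec : Claim_equal_build_duplicate_groups := by
  intro rows key_columns exclude_all_blank _
  show build_duplicate_groups rows key_columns exclude_all_blank
      = build_duplicate_groups_alt rows key_columns exclude_all_blank
  unfold build_duplicate_groups build_duplicate_groups_alt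
  rw [bdg_foldA key_columns exclude_all_blank rows PySem.Dict.empty 0,
    bdg_foldB1 key_columns exclude_all_blank rows [] PySem.Dict.empty 0]
  simp only [List.nil_append]
  rw [bdg_zip_self_map, bdg_foldB2]
  have hnodup : (bdgG (bdgPairs rows key_columns exclude_all_blank) PySem.Dict.empty).keys.Nodup := by
    apply PySem.Dict.nodup_keys_foldl_modify_key
    exact PySem.Dict.nodup_keys_empty
  have hG : (bdgG ((bdgPairs rows key_columns exclude_all_blank).filter
        (fun p => decide ((List.foldl (fun d x => d.insert x (d.getD x 0 + 1)) (PySem.Dict.empty : PySem.Dict (List String) Int)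
          (List.map Prod.fst (bdgPairs rows key_columns exclude_all_blank))).getD p.1 0 ≥ 2)))
        PySem.Dict.empty).items
      = (bdgG (bdgPairs rows key_columns exclude_all_blank) PySem.Dict.empty).items.filter
        (fun p => decide ((List.foldl (fun d x => d.insert x (d.getD x 0 + 1)) (PySem.Dict.empty : PySem.Dict (List String) Int)
          (List.map Prod.fst (bdgPairs rows key_columns exclude_all_blank))).getD p.1 0 ≥ 2)) :=
    bdg_G_filter (fun k => decide ((List.foldl (fun d x => d.insert x (d.getD x 0 + 1)) (PySem.Dict.empty : PySem.Dict (List String) Int)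
        (List.map Prod.fst (bdgPairs rows key_columns exclude_all_blank))).getD k 0 ≥ 2))
      (bdgPairs rows key_columns exclude_all_blank) PySem.Dict.empty
  congr 1
  refine Eq.trans ?_ hG.symm
  apply List.filter_congr
  intro p hp
  obtain ⟨k, g⟩ := p
  have hval : g = ((bdgPairs rows key_columns exclude_all_blank).filter
      (fun q => q.1 == k)).map (fun q => q.2) := by
    have h2 := PySem.Dict.getD_of_mem_items (h := hp) (hnd := hnodup) (d0 := [])
    simp only [bdgG] at h2
    rw [PySem.Dict.getD_foldl_modify_append] at h2
    rw [← h2]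
    simp [PySem.Dict.getD_empty]
  have hcnt : (List.foldl (fun d x => d.insert x (d.getD x 0 + 1)) (PySem.Dict.empty : PySem.Dict (List String) Int)
      (List.map Prod.fst (bdgPairs rows key_columns exclude_all_blank))).getD k 0
      = ((((bdgPairs rows key_columns exclude_all_blank).filter (fun q => q.1 == k)).length : Int)) := by
    rw [PySem.Dict.getD_foldl_insert_add_one]
    rw [← List.countP_eq_length_filter]
    simp [PySem.Dict.getD_empty, List.count_eq_countP, List.countP_map]
    rfl
  simp only [hcnt, hval, List.length_map, decide_eq_decide]
  omega
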